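-- pv_equiv track=rewrite | github.com/anishfelixm/100daysofCP | python/64a_1646B_QualityVsQuantity.py | solve
-- ===== SOURCE A (Python) =====
-- def solve(arr, n):
--     arr.sort()
--     b, r, front, back = arr[0], 0, 1, n-1
--     while front < back:
--         b += arr[front]
--         r += arr[back]
--         front += 1
--         back -= 1
--         if b < r:
--             return "YES"
--     return "NO"
-- ===== SOURCE B (Python) =====
-- def solve(arr, n):
--     a = sorted(arr)
--     m = (n - 1) // 2
--     if m < 1:
--         return "NO"
--     return "YES" if sum(a[:m + 1]) < sum(a[n - m:n]) else "NO"
-- ===== Notes on version B (the rewrite author's own statement) =====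
-- stated objective: simpler
-- what changed: Replaces A's incremental two-pointer scan with early exit by one closed-form comparison: since the array is sorted, red-minus-blue is non-decreasing over iterations, so only the maximal pairing m=(n-1)//2 matters; B compares sum of the m+1 smallest against sum of the m largest (within the first n sorted elements).
import Mathlib
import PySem

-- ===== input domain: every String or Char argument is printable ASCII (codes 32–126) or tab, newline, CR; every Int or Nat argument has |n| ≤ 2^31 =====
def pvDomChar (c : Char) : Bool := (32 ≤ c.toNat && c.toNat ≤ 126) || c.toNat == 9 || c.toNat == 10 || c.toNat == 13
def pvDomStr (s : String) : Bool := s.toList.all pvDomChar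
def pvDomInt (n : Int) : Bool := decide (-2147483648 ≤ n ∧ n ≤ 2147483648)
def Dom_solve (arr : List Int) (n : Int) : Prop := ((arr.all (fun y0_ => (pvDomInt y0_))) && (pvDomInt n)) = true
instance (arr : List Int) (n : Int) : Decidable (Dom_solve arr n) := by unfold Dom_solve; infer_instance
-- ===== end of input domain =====

-- B replaces A's incremental two-pointer scan by one closed-form comparison at the maximal
-- pairing m = (n-1)//2 (simpler; equivalence is about the RETURN value only: A sorts arr in
-- place, B does not mutate its argument).

-- ===== PORT A =====
-- the while loop of A: state (b, r, front, back), early return "YES" inside the loop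
def solveLoopA (a : List Int) (b r front back : Int) : String :=
  if h : front < back then
    let b' := b + PySem.List.pyGetD a front 0
    let r' := r + PySem.List.pyGetD a back 0
    if b' < r' then "YES" else solveLoopA a b' r' (front + 1) (back - 1)
  else "NO"
termination_by (back - front).toNat
decreasing_by omega

def solve (arr : List Int) (n : Int) : String :=
  let a := PySem.List.sorted arr (fun x => x) false
  solveLoopA a (PySem.List.pyGetD a 0 0) 0 1 (n - 1)

-- ===== PORT B =====
def solve_alt (arr : List Int) (n : Int) : String :=
  let a := PySem.List.sorted arr (fun x => x) false
  let m := PySem.Int.floordiv (n - 1) 2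
  if m < 1 then "NO"
  else if (PySem.List.slice a none (some (m + 1))).sum
        < (PySem.List.slice a (some (n - m)) (some n)).sum then "YES" else "NO"

-- ===== PRECONDITION & SPEC =====
-- Pre_ admits exactly the inputs on which A returns: a nonempty list, and either n ≤ len(arr)
-- (the two-pointer indices stay in range) or n ≤ 2 (the loop body never runs).
def Pre_solve (arr : List Int) (n : Int) : Prop :=
  arr ≠ [] ∧ (n ≤ (arr.length : Int) ∨ n ≤ 2)
instance (arr : List Int) (n : Int) : Decidable (Pre_solve arr n) := by unfold Pre_solve; infer_instance
def pvWitness_solve : List Int × Int := ([3, 1, 2], 3)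

def Spec_solve (arr : List Int) (n : Int) (out : String) : Prop := out = solve_alt arr n
instance (arr : List Int) (n : Int) (out : String) : Decidable (Spec_solve arr n out) := by unfold Spec_solve; infer_instance

-- ===== CLAIM (what is proved, stated in full; the proofs are below) =====
def Claim_equal_solve : Prop := ∀ (arr : List Int) (n : Int), Dom_solve arr n → Pre_solve arr n → Spec_solve arr n (solve arr n)

-- ===== LEMMAS AND PROOFS =====

-- the two sums A's loop accumulates, as a recursion mirroring the loop
def pairSums (a : List Int) (front back : Int) : Int × Int :=
  if _h : front < back then
    let p := pairSums a (front + 1) (back - 1)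
    (PySem.List.pyGetD a front 0 + p.1, PySem.List.pyGetD a back 0 + p.2)
  else (0, 0)
termination_by (back - front).toNat
decreasing_by omega

theorem pairSums_step (a : List Int) (front back : Int) (h : front < back) :
    pairSums a front back =
      (PySem.List.pyGetD a front 0 + (pairSums a (front + 1) (back - 1)).1,
       PySem.List.pyGetD a back 0 + (pairSums a (front + 1) (back - 1)).2) := by
  rw [pairSums]; simp [h]

theorem pairSums_stop (a : List Int) (front back : Int) (h : ¬ front < back) :
    pairSums a front back = (0, 0) := by
  rw [pairSums]; simp [h]

-- on a sorted segment the low-pointer sum never exceeds the high-pointer sum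
theorem pairSums_le (a : List Int)
    (hmono : ∀ (p q : Nat) (hp : p < a.length) (hq : q < a.length), p ≤ q → a[p] ≤ a[q])
    (front back : Int) (hf : 0 ≤ front) (hb : back < (a.length : Int)) :
    (pairSums a front back).1 ≤ (pairSums a front back).2 := by
  fun_induction pairSums a front back with
  | case1 front back h p ih =>
    have hih := ih (by omega) (by omega)
    have h1 : PySem.List.pyGetD a front 0 = a[front.toNat]'(by omega) :=
      PySem.List.pyGetD_eq_getElem a 0 hf (by omega)
    have h2 : PySem.List.pyGetD a back 0 = a[back.toNat]'(by omega) :=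
      PySem.List.pyGetD_eq_getElem a 0 (by omega) hb
    have hm := hmono front.toNat back.toNat (by omega) (by omega) (by omega)
    show PySem.List.pyGetD a front 0 + p.1 ≤ PySem.List.pyGetD a back 0 + p.2
    have hpe : p = pairSums a (front + 1) (back - 1) := rfl
    rw [h1, h2, hpe]
    omega
  | case2 => simp

-- A's loop equals the single comparison of the two accumulated sums (monotone early exit)
theorem solveLoopA_eq (a : List Int)
    (hmono : ∀ (p q : Nat) (hp : p < a.length) (hq : q < a.length), p ≤ q → a[p] ≤ a[q])
    (b r front back : Int) (hf : 0 ≤ front) (hb : back < (a.length : Int)) :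
    solveLoopA a b r front back =
      if front < back then
        (if b + (pairSums a front back).1 < r + (pairSums a front back).2 then "YES" else "NO")
      else "NO" := by
  fun_induction solveLoopA a b r front back with
  | case1 b r front back h b' r' hlt =>
    -- early "YES": the final comparison also holds at the end
    have hple := pairSums_le a hmono (front + 1) (back - 1) (by omega) (by omega)
    rw [if_pos h, pairSums_step a front back h]
    simp only [b', r'] at hlt
    rw [if_pos (by omega :
      b + (PySem.List.pyGetD a front 0 + (pairSums a (front + 1) (back - 1)).1)
      < r + (PySem.List.pyGetD a back 0 + (pairSums a (front + 1) (back - 1)).2))]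
  | case2 b r front back h b' r' hlt ih =>
    have ih' := ih (by omega) (by omega)
    simp only [b', r'] at hlt ih' ⊢
    rw [if_pos h, pairSums_step a front back h, ih']
    by_cases h2 : front + 1 < back - 1
    · rw [if_pos h2]
      simp only [← add_assoc]
    · rw [if_neg h2, pairSums_stop a (front + 1) (back - 1) h2]
      rw [if_neg (by simpa using (by omega :
        ¬ b + (PySem.List.pyGetD a front 0 + (0:Int))
          < r + (PySem.List.pyGetD a back 0 + (0:Int))))]
  | case3 b r front back h => simp [h]

-- the accumulated sums are sums of c-element prefixes/suffixes of the scanned segment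
theorem pairSums_eq_sums (a : List Int) :
    ∀ (c f bk : Nat), f + 2 * c ≤ bk + 1 → bk ≤ f + 2 * c → bk < a.length →
    pairSums a (f : Int) (bk : Int) =
      (((a.drop f).take c).sum, ((a.drop (bk + 1 - c)).take c).sum) := by
  intro c
  induction c with
  | zero =>
    intro f bk h1 h2 hbl
    rw [pairSums_stop a _ _ (by exact_mod_cast by omega)]
    simp
  | succ c ih =>
    intro f bk h1 h2 hbl
    have hfb : (f : Int) < (bk : Int) := by exact_mod_cast by omega
    rw [pairSums_step a _ _ hfb]
    have e1 : (f : Int) + 1 = ((f + 1 : Nat) : Int) := by push_cast; ring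
    have e2 : (bk : Int) - 1 = ((bk - 1 : Nat) : Int) := by omega
    rw [e1, e2, ih (f + 1) (bk - 1) (by omega) (by omega) (by omega)]
    have e3 : bk - 1 + 1 - c = bk - c := by omega
    have e4 : bk + 1 - (c + 1) = bk - c := by omega
    rw [e3, e4]
    have g1 : PySem.List.pyGetD a (f : Int) 0 = a[f]'(by omega) := by
      rw [PySem.List.pyGetD_eq_getElem a 0 (by omega) (by exact_mod_cast hbl.trans_le' (by omega))]
      simp
    have g2 : PySem.List.pyGetD a (bk : Int) 0 = a[bk]'(hbl) := by
      rw [PySem.List.pyGetD_eq_getElem a 0 (by omega) (by exact_mod_cast hbl)]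
      simp
    have hlow : ((a.drop f).take (c + 1)).sum = a[f]'(by omega) + ((a.drop (f + 1)).take c).sum := by
      rw [List.drop_eq_getElem_cons (by omega : f < a.length), List.take_succ_cons]
      simp
    have hhigh : ((a.drop (bk - c)).take (c + 1)).sum
        = a[bk]'(hbl) + ((a.drop (bk - c)).take c).sum := by
      rw [List.take_add_one]
      have hcl : c < (a.drop (bk - c)).length := by
        rw [List.length_drop]; omega
      rw [List.getElem?_eq_getElem hcl]
      have : (a.drop (bk - c))[c]'(hcl) = a[bk]'(hbl) := by
        rw [List.getElem_drop]
        congr 1; omega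
      rw [this]
      simp [add_comm]
    rw [g1, g2, hlow, hhigh]

-- ===== VERDICT (by name: the statement is the Claim_ definition above) =====
theorem solve_spec : Claim_equal_solve := by
  intro arr n _hdom hpre
  obtain ⟨hne, hcase⟩ := hpre
  unfold Spec_solve solve solve_alt
  set a := PySem.List.sorted arr (fun x => x) false with ha
  have hlen : a.length = arr.length := PySem.List.length_sorted ..
  have hane : a ≠ [] := by
    intro h0; exact hne ((PySem.List.sorted_eq_nil_iff arr (fun x => x) false).1 h0)
  have hlenpos : 0 < a.length := List.length_pos_of_ne_nil hane
  have hfd : PySem.Int.floordiv (n - 1) 2 = (n - 1) / 2 :=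
    PySem.Int.floordiv_eq_ediv_of_pos (by omega)
  have hmono : ∀ (p q : Nat) (hp : p < a.length) (hq : q < a.length), p ≤ q → a[p] ≤ a[q] := by
    intro p q hp hq hpq
    exact PySem.List.sorted_id_getElem_mono arr hpq hq
  by_cases hn : n ≤ 2
  · -- loop body never runs; m < 1
    have hA : solveLoopA a (PySem.List.pyGetD a 0 0) 0 1 (n - 1) = "NO" := by
      rw [solveLoopA]; simp [show ¬ (1 < n - 1) by omega]
    simp only [hA, hfd]
    rw [if_pos (by omega : (n - 1) / 2 < 1)]
  · -- 3 ≤ n ≤ len: one comparison at the maximal pairing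
    have hn3 : 3 ≤ n := by omega
    have hnlen : n ≤ (a.length : Int) := by rw [hlen]; omega
    set m : Int := (n - 1) / 2 with hm
    have hm1 : 1 ≤ m := by omega
    have hA := solveLoopA_eq a hmono (PySem.List.pyGetD a 0 0) 0 1 (n - 1) (by omega) (by omega)
    have hps := pairSums_eq_sums a m.toNat 1 (n - 1).toNat (by omega) (by omega) (by omega)
    rw [show (((1 : Nat)) : Int) = (1 : Int) from rfl,
        show (((n - 1).toNat : Nat) : Int) = n - 1 by omega,
        show (n - 1).toNat + 1 - m.toNat = (n - m).toNat by omega] at hps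
    rw [hA, hps, if_pos (by omega : (1:Int) < n - 1)]
    have h0 : PySem.List.pyGetD a 0 0 = a[0]'(hlenpos) := by
      rw [PySem.List.pyGetD_eq_getElem a 0 (by omega) (by exact_mod_cast hlenpos)]
      rfl
    -- B's slices
    have hs1 : PySem.List.slice a none (some (m + 1)) = a.take (m + 1).toNat :=
      PySem.List.slice_to a (by omega)
    have hs2 : PySem.List.slice a (some (n - m)) (some n)
        = (a.drop (n - m).toNat).take (n.toNat - (n - m).toNat) :=
      PySem.List.slice_toNat a (by omega) (by omega)
    have hsplit : (a.take (m + 1).toNat).sum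
        = a[0]'(hlenpos) + ((a.drop 1).take m.toNat).sum := by
      have hcons : a = a[0]'(hlenpos) :: a.drop 1 := by
        conv_lhs => rw [← List.drop_zero (l := a)]
        simpa using List.drop_eq_getElem_cons (l := a) (i := 0) hlenpos
      conv_lhs => rw [hcons]
      rw [show (m + 1).toNat = m.toNat + 1 by omega, List.take_succ_cons]
      simp
    simp only [hfd]
    rw [if_neg (by omega : ¬ m < 1), hs1, hs2,
        show n.toNat - (n - m).toNat = m.toNat by omega, hsplit, h0, zero_add]
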